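-- pv_equiv track=rewrite | github.com/Rishabh1208/BloomBerg | Discuss-problems/21.py | solve
-- ===== SOURCE A (Python) =====
-- def solve(nums, ranges):
--
--     mp = dict()
--
--     for num in nums:
--         mp[num] = 1
--
--     result = []
--
--     for x in range(1, len(ranges)):
--
--         count = 0
--         minVal = ranges[x-1]
--         maxVal = ranges[x]
--
--         for x in range(minVal, maxVal):
--             if x in mp:
--                 count += 1
--
--         result.append(count)
--
--     return result
-- ===== SOURCE B (Python) =====
-- def solve(nums, ranges):
--     # Count distinct nums in each consecutive [ranges[i], ranges[i+1]) interval
--     # by scanning the set of distinct nums once per interval, instead of walking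
--     # every integer of the interval's span.
--     uniq = set(nums)
--     return [sum(1 for v in uniq if lo <= v < hi)
--             for lo, hi in zip(ranges, ranges[1:])]
-- ===== Notes on version B (the rewrite author's own statement) =====
-- stated objective: alternative
-- what changed: B builds the set of distinct nums once and, for each consecutive pair of range boundaries (via zip), counts the distinct values lying inside the interval, instead of inserting nums into a dict and walking every integer of each interval testing dict membership.
import Mathlib
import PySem

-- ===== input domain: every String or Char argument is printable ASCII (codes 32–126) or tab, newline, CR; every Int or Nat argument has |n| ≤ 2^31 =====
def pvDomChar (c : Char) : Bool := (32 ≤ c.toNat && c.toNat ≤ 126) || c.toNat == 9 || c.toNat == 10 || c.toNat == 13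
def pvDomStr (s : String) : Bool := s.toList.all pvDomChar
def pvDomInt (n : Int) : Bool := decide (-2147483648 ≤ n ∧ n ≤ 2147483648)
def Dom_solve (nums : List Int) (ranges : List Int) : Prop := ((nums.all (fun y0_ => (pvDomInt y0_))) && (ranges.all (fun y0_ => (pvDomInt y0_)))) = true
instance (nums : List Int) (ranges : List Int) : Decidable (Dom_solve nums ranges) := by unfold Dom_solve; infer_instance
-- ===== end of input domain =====

-- B counts the distinct nums inside each consecutive boundary interval by one scan
-- of set(nums) per interval, instead of walking every integer of the interval's span.

-- ===== PORT A =====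
def solve (nums : List Int) (ranges : List Int) : List Int :=
  let mp : PySem.Dict Int Int := nums.foldl (fun d num => d.insert num 1) PySem.Dict.empty
  (PySem.List.pyRange 1 (ranges.length : Int) 1).foldl
    (fun result x =>
      let minVal := PySem.List.pyGetD ranges (x - 1) 0
      let maxVal := PySem.List.pyGetD ranges x 0
      let count : Int :=
        (PySem.List.pyRange minVal maxVal 1).foldl
          (fun count y => if mp.contains y then count + 1 else count) 0
      result ++ [count]) []

-- ===== PORT B =====
def solve_alt (nums : List Int) (ranges : List Int) : List Int :=
  let uniq : PySem.Set Int := PySem.Set.ofList nums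
  (ranges.zip (PySem.List.slice ranges (some 1) none)).map
    (fun p => ((uniq.countP (fun v => decide (p.1 ≤ v ∧ v < p.2)) : Nat) : Int))

-- ===== PRECONDITION & SPEC =====
def Spec_solve (nums : List Int) (ranges : List Int) (out : List Int) : Prop := out = solve_alt nums ranges
instance (nums : List Int) (ranges : List Int) (out : List Int) : Decidable (Spec_solve nums ranges out) := by unfold Spec_solve; infer_instance

-- ===== CLAIM (what is proved, stated in full; the proofs are below) =====
def Claim_equal_solve : Prop := ∀ (nums : List Int) (ranges : List Int), Dom_solve nums ranges → Spec_solve nums ranges (solve nums ranges)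

-- ===== LEMMAS AND PROOFS =====

-- membership in A's dict (value 1 at every num) is membership in nums
lemma contains_mp (nums : List Int) (y : Int) :
    (nums.foldl (fun d num => d.insert num (1 : Int)) PySem.Dict.empty).contains y
      = decide (y ∈ nums) := by
  rw [PySem.Dict.contains_eq_decide_mem_keys,
      PySem.Dict.keys_foldl_insert (f := fun _ _ => (1:Int))]
  simp [PySem.Dict.keys_empty, PySem.Set.update_nil_left, PySem.Set.mem_ofList]

-- counting the integers of [lo, hi) that occur in nums = counting the distinct
-- nums that lie in [lo, hi): both filters are Nodup with the same members
lemma inner_count (nums : List Int) (lo hi : Int) :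
    ((PySem.List.pyRange lo hi 1).countP (fun y => decide (y ∈ nums)))
      = (PySem.Set.ofList nums).countP (fun v => decide (lo ≤ v ∧ v < hi)) := by
  rw [List.countP_eq_length_filter, List.countP_eq_length_filter]
  apply List.Perm.length_eq
  apply (List.perm_ext_iff_of_nodup
    (List.Nodup.filter _ (PySem.List.nodup_pyRange_one lo hi))
    (List.Nodup.filter _ (PySem.Set.nodup_ofList nums))).2
  intro a
  simp only [List.mem_filter, PySem.List.mem_pyRange_one, PySem.Set.mem_ofList,
    decide_eq_true_eq]
  tauto

-- ===== VERDICT (by name: the statement is the Claim_ definition above) =====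
theorem solve_spec : Claim_equal_solve := by
  intro nums ranges _
  unfold Spec_solve solve solve_alt
  simp only [PySem.List.foldl_append_singleton_eq_map, List.nil_append,
    PySem.List.foldl_if_add_one, contains_mp, zero_add, PySem.List.slice_from_one]
  apply List.ext_getElem
  · simp [PySem.List.length_pyRange_one]
  · intro k h1 h2
    simp only [List.getElem_map, PySem.List.getElem_pyRange_one, List.getElem_zip,
      List.getElem_tail]
    have hk : k < ranges.length - 1 := by
      simpa [PySem.List.length_pyRange_one] using h1
    have e1 : (1 : Int) + (k : Int) - 1 = ((k : Nat) : Int) := by ring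
    have e2 : (1 : Int) + (k : Int) = (((k+1) : Nat) : Int) := by push_cast; ring
    rw [e1, e2, PySem.List.pyGetD_natCast, PySem.List.pyGetD_natCast,
      List.getD_eq_getElem _ _ (by omega), List.getD_eq_getElem _ _ (by omega)]
    rw [inner_count]
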